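-- pv_equiv track=rewrite | github.com/JeonJe/Algorithm | archive/legacy/4.programmers/practice/Prog_2018_카카오_파일명정렬.py | find_num_indexs
-- ===== SOURCE A (Python) =====
-- def find_num_indexs(filename):
--     start_idx, end_idx = 0, 0
--     find_num = False
--     num_cnt = 0
--     for j in range(len(filename)):
--         if filename[j].isdigit() and not find_num:
--             find_num = True
--             start_idx,end_idx = j,j
--             num_cnt = 1
--         elif filename[j].isdigit() and find_num:
--             num_cnt+=1
--             end_idx = j
--             if num_cnt >= 5:
--                 break
--         elif not filename[j].isdigit() and find_num:
--             end_idx = j-1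
--             break
--
--     return [start_idx, end_idx]
-- ===== SOURCE B (Python) =====
-- def find_num_indexs(filename):
--     # Run-length encode the whole filename into maximal blocks (is_digit, start, end),
--     # then query the encoding for the first digit block, capping its end at start+4.
--     runs = []
--     cur = None
--     for i, c in enumerate(filename):
--         d = c.isdigit()
--         if cur is None:
--             cur = [d, i, i]
--         elif cur[0] == d:
--             cur[2] = i
--         else:
--             runs.append(cur)
--             cur = [d, i, i]
--     if cur is not None:
--         runs.append(cur)
--     for d, s, e in runs:
--         if d:
--             return [s, min(e, s + 4)]
--     return [0, 0]
-- ===== Notes on version B (the rewrite author's own statement) =====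
-- stated objective: alternative
-- what changed: Replaces A's flag-driven early-exit state machine by a two-stage pipeline: first build a full run-length encoding of the filename into maximal (is_digit, start, end) blocks, then query that encoding for the first digit block and cap its end at start+4.
import Mathlib
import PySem

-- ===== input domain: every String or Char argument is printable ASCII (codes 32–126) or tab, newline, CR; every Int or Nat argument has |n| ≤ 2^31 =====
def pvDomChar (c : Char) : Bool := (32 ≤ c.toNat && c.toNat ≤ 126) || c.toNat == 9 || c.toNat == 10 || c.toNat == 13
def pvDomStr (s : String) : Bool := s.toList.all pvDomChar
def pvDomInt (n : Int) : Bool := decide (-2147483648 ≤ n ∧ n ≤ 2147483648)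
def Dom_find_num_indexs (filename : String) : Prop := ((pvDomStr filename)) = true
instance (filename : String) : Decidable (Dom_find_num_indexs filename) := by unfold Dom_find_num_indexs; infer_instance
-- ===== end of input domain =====

-- B replaces A's flag-driven early-exit state machine by a two-stage pipeline:
-- run-length encode the filename into maximal (is_digit, start, end) blocks,
-- then query the encoding for the first digit block (end capped at start+4). Same cost.

-- ===== PORT A =====
-- A's indexed for-loop over filename with state (start_idx, end_idx, find_num, num_cnt);
-- recursion over the character list carrying the current index j, branches in A's order.
def pvALoop : List Char → Int → Int × Int × Bool × Int → Int × Int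
  | [], _, (s, e, _, _) => (s, e)
  | c :: cs, j, (s, e, find, cnt) =>
    if PySem.Chars.isdigit c && !find then
      pvALoop cs (j + 1) (j, j, true, 1)
    else if PySem.Chars.isdigit c && find then
      let cnt' := cnt + 1
      if cnt' ≥ 5 then (s, j) else pvALoop cs (j + 1) (s, j, find, cnt')
    else if !(PySem.Chars.isdigit c) && find then
      (s, j - 1)
    else
      pvALoop cs (j + 1) (s, e, find, cnt)

def find_num_indexs (filename : String) : List Int :=
  let r := pvALoop filename.toList 0 (0, 0, false, 0)
  [r.1, r.2]

-- ===== PORT B =====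
-- stage 1 of Source B: run-length encoding loop; state = completed runs + the open run `cur`,
-- followed by the final 'if cur is not None: runs.append(cur)'
def pvBuild : List Char → Nat → List (Bool × Nat × Nat) → Option (Bool × Nat × Nat) → List (Bool × Nat × Nat)
  | [], _, runs, cur => runs ++ cur.toList
  | c :: cs, i, runs, cur =>
    let d := PySem.Chars.isdigit c
    match cur with
    | none => pvBuild cs (i + 1) runs (some (d, i, i))
    | some (d0, s0, _) =>
      if d0 == d then pvBuild cs (i + 1) runs (some (d0, s0, i))
      else pvBuild cs (i + 1) (runs ++ [(d0, s0, i - 1)]) (some (d, i, i))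

-- stage 2 of Source B: first digit run in the encoding
def pvFindRun : List (Bool × Nat × Nat) → Option (Nat × Nat)
  | [] => none
  | (d, s, e) :: rs => if d then some (s, e) else pvFindRun rs

def find_num_indexs_alt (filename : String) : List Int :=
  match pvFindRun (pvBuild filename.toList 0 [] none) with
  | some (s, e) => [(s : Int), min (e : Int) ((s : Int) + 4)]
  | none => [0, 0]

-- ===== PRECONDITION & SPEC =====
def Spec_find_num_indexs (filename : String) (out : List Int) : Prop := out = find_num_indexs_alt filename
instance (filename : String) (out : List Int) : Decidable (Spec_find_num_indexs filename out) := by unfold Spec_find_num_indexs; infer_instance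

-- ===== CLAIM (what is proved, stated in full; the proofs are below) =====
def Claim_equal_find_num_indexs : Prop := ∀ (filename : String), Dom_find_num_indexs filename → Spec_find_num_indexs filename (find_num_indexs filename)

-- ===== LEMMAS AND PROOFS =====

-- proof-side helpers: first digit index with the remaining characters, and leading-digit count
def fdRem : List Char → Nat → Option (Nat × List Char)
  | [], _ => none
  | c :: cs, i => if PySem.Chars.isdigit c then some (i, cs) else fdRem cs (i + 1)

def dcount : List Char → Nat
  | [] => 0
  | c :: cs => if PySem.Chars.isdigit c then dcount cs + 1 else 0

-- A-side: the capped extension count (shape of A's found-phase), and its closed form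
def pvBExtend : List Char → Int → Int
  | [], extra => extra
  | c :: cs, extra =>
    if extra ≥ 4 || !(PySem.Chars.isdigit c) then extra else pvBExtend cs (extra + 1)

theorem pvBExtend_min (cs : List Char) : ∀ (x : Int), 0 ≤ x → x ≤ 4 →
    pvBExtend cs x = min (x + (dcount cs : Int)) 4 := by
  induction cs with
  | nil => intro x h0 h4; simp [pvBExtend, dcount]; omega
  | cons c cs ih =>
    intro x h0 h4
    by_cases hd : PySem.Chars.isdigit c = true
    · by_cases hx : x ≥ 4
      · simp [pvBExtend, dcount, hd, hx]; omega
      · have := ih (x + 1) (by omega) (by omega)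
        simp [pvBExtend, dcount, hd, hx, this]; omega
    · simp [pvBExtend, dcount, hd]; omega

theorem pvBExtend_of_ge4 (cs : List Char) (x : Int) (h : 4 ≤ x) : pvBExtend cs x = x := by
  cases cs with
  | nil => rfl
  | cons c cs => simp [pvBExtend, h]

-- A's found phase
theorem pvALoop_found (cs : List Char) : ∀ (j s cnt : Int), 1 ≤ cnt → cnt ≤ 4 →
    pvALoop cs j (s, j - 1, true, cnt) = (s, j - cnt + pvBExtend cs (cnt - 1)) := by
  induction cs with
  | nil => intro j s cnt h1 h4; simp [pvALoop, pvBExtend]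
  | cons c cs ih =>
    intro j s cnt h1 h4
    by_cases hd : PySem.Chars.isdigit c = true
    · by_cases h5 : cnt + 1 ≥ 5
      · have hc4 : cnt = 4 := by omega
        subst hc4
        simp [pvALoop, pvBExtend, hd, pvBExtend_of_ge4 cs 4 (le_refl 4)]
      · have hih : pvALoop cs (j + 1) (s, j, true, cnt + 1) =
            (s, j + 1 - (cnt + 1) + pvBExtend cs cnt) := by
          have := ih (j + 1) s (cnt + 1) (by omega) (by omega)
          simpa using this
        simp [pvALoop, pvBExtend, hd, h5, hih, show ¬ cnt - 1 ≥ 4 by omega]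
    · simp [pvALoop, pvBExtend, hd, show ¬ cnt - 1 ≥ 4 by omega]

-- A's not-yet-found phase, characterised through fdRem
theorem pvALoop_notfound (cs : List Char) : ∀ (j : Nat),
    pvALoop cs (j : Int) (0, 0, false, 0) =
      match fdRem cs j with
      | none => (0, 0)
      | some (k, rest) => ((k : Int), (k : Int) + pvBExtend rest 0) := by
  induction cs with
  | nil => intro j; simp [pvALoop, fdRem]
  | cons c cs ih =>
    intro j
    by_cases hd : PySem.Chars.isdigit c = true
    · have h := pvALoop_found cs ((j : Int) + 1) (j : Int) 1 (by omega) (by omega)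
      simp [pvALoop, fdRem, hd]
      simpa using h
    · have hrec := ih (j + 1)
      simp [pvALoop, fdRem, hd]
      rw [show ((j : Int) + 1) = ((j + 1 : Nat) : Int) by push_cast; ring, hrec]

-- B-side: the encoding loop only appends to `runs`
theorem pvBuild_append (cs : List Char) : ∀ (i : Nat) (runs : List (Bool × Nat × Nat))
    (cur : Option (Bool × Nat × Nat)),
    pvBuild cs i runs cur = runs ++ pvBuild cs i [] cur := by
  induction cs with
  | nil => intro i runs cur; simp [pvBuild]
  | cons c cs ih =>
    intro i runs cur
    match cur with
    | none => simp only [pvBuild]; exact ih (i + 1) runs _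
    | some (d0, s0, e0) =>
      simp only [pvBuild]
      by_cases h : (d0 == PySem.Chars.isdigit c) = true
      · rw [if_pos h, if_pos h]
        exact ih (i + 1) runs _
      · rw [if_neg h, if_neg h,
          ih (i + 1) (runs ++ [(d0, s0, i - 1)]), ih (i + 1) ([] ++ [(d0, s0, i - 1)])]
        simp

-- B-side: open digit run ending at i-1 extends by the leading digits of cs
theorem pvBuild_true (cs : List Char) : ∀ (i s e : Nat), e + 1 = i →
    pvFindRun (pvBuild cs i [] (some (true, s, e))) = some (s, e + dcount cs) := by
  induction cs with
  | nil => intro i s e _; simp [pvBuild, pvFindRun, dcount]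
  | cons c cs ih =>
    intro i s e hei
    by_cases hd : PySem.Chars.isdigit c = true
    · have := ih (i + 1) s i rfl
      simp [pvBuild, hd, dcount, this]; omega
    · simp only [pvBuild, hd]
      rw [if_neg (by simp), pvBuild_append]
      simp [pvFindRun, dcount, hd, show i - 1 = e by omega]

-- B-side: before any digit is seen (cur is none or a non-digit run), the result
-- is governed by the first digit index
theorem pvBuild_pre (cs : List Char) : ∀ (i : Nat) (cur : Option (Bool × Nat × Nat)),
    (cur = none ∨ ∃ a b, cur = some (false, a, b)) →
    pvFindRun (pvBuild cs i [] cur) =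
      match fdRem cs i with
      | none => none
      | some (k, rest) => some (k, k + dcount rest) := by
  induction cs with
  | nil =>
    intro i cur hcur
    rcases hcur with h | ⟨a, b, h⟩ <;> subst h <;> simp [pvBuild, pvFindRun, fdRem]
  | cons c cs ih =>
    intro i cur hcur
    by_cases hd : PySem.Chars.isdigit c = true
    · rcases hcur with h | ⟨a, b, h⟩ <;> subst h
      · have := pvBuild_true cs (i + 1) i i rfl
        simp [pvBuild, hd, fdRem, this]
      · simp only [pvBuild, hd]
        rw [if_neg (by simp), pvBuild_append]
        have := pvBuild_true cs (i + 1) i i rfl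
        simp [pvFindRun, fdRem, hd, this]
    · rcases hcur with h | ⟨a, b, h⟩ <;> subst h
      · have := ih (i + 1) (some (false, i, i)) (Or.inr ⟨i, i, rfl⟩)
        simp [pvBuild, hd, fdRem, this]
      · have := ih (i + 1) (some (false, a, i)) (Or.inr ⟨a, i, rfl⟩)
        simp only [pvBuild, hd]
        rw [if_pos (by simp), this]
        simp [fdRem, hd]

-- ===== VERDICT (by name: the statement is the Claim_ definition above) =====
theorem find_num_indexs_spec : Claim_equal_find_num_indexs := by
  intro filename _
  unfold Spec_find_num_indexs find_num_indexs find_num_indexs_alt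
  have hA := pvALoop_notfound filename.toList 0
  have hB := pvBuild_pre filename.toList 0 none (Or.inl rfl)
  simp only [Nat.cast_zero] at hA
  rw [hA, hB]
  cases hfs : fdRem filename.toList 0 with
  | none => simp
  | some kr =>
    obtain ⟨k, rest⟩ := kr
    have hE := pvBExtend_min rest 0 (by omega) (by omega)
    simp [hE]
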